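-- pv_equiv track=rewrite | github.com/cgw0331/Fruit_Box_ | main.py | merge_nearby_positions
-- ===== SOURCE A (Python) =====
-- def merge_nearby_positions(positions, threshold=5):
--     """인접한 위치들을 하나로 병합"""
--     if not positions:
--         return []
--
--     merged = []
--     current_group = [positions[0]]
--
--     for pos in positions[1:]:
--         last_pos = current_group[-1]
--         if abs(pos[0] - last_pos[0]) <= threshold and abs(pos[1] - last_pos[1]) <= threshold:
--             current_group.append(pos)
--         else:
--             if current_group:
--                 avg_x = sum(p[0] for p in current_group) // len(current_group)
--                 avg_y = sum(p[1] for p in current_group) // len(current_group)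
--                 merged.append((avg_x, avg_y, current_group[0][2], current_group[0][3]))
--             current_group = [pos]
--
--     if current_group:
--         avg_x = sum(p[0] for p in current_group) // len(current_group)
--         avg_y = sum(p[1] for p in current_group) // len(current_group)
--         merged.append((avg_x, avg_y, current_group[0][2], current_group[0][3]))
--
--     return merged
-- ===== SOURCE B (Python) =====
-- def merge_nearby_positions(positions, threshold=5):
--     """인접한 위치들을 하나로 병합"""
--     # pass 1: label every position with a group id = number of breaks before it
--     labels = []
--     gid = 0
--     prev = None
--     for pos in positions:
--         if prev is not None and (abs(pos[0] - prev[0]) > threshold or abs(pos[1] - prev[1]) > threshold):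
--             gid += 1
--         labels.append(gid)
--         prev = pos
--     # pass 2: hash-aggregate sum_x, sum_y, count and first tags per group id
--     agg = {}
--     for g, pos in zip(labels, positions):
--         if g in agg:
--             sx, sy, c, t2, t3 = agg[g]
--             agg[g] = (sx + pos[0], sy + pos[1], c + 1, t2, t3)
--         else:
--             agg[g] = (pos[0], pos[1], 1, pos[2], pos[3])
--     # pass 3: emit averages in group order (dict keeps insertion order)
--     return [(sx // c, sy // c, t2, t3) for (sx, sy, c, t2, t3) in agg.values()]
-- ===== Notes on version B (the rewrite author's own statement) =====
-- stated objective: alternative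
-- what changed: Replaces A's single scan-and-flush pass (mutable current_group list flushed into merged in two places) by a label-then-aggregate algorithm: one pass assigns each position a group id (prefix count of breaks), a second pass hash-aggregates sums/counts/first-tags per group id in a dict, and a final comprehension emits the floor-averaged tuples from the dict values in insertion order.
import Mathlib
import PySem

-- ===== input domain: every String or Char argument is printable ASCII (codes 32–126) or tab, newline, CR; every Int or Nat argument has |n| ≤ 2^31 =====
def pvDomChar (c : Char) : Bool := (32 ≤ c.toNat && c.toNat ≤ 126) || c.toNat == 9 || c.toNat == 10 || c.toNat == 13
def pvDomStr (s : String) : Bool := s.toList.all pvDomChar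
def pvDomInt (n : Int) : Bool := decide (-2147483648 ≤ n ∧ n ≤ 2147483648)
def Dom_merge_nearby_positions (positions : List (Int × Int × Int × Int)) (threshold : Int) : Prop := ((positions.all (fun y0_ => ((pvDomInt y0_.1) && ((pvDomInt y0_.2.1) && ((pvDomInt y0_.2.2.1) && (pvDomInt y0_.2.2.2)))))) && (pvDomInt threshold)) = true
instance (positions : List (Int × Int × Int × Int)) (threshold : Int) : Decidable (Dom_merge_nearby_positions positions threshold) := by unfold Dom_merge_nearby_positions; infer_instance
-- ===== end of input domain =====

-- B replaces A's scan-and-flush pass by label-then-hash-aggregate (dict per group id); same values.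

-- ===== PORT A =====
-- flush of current_group: (avg_x, avg_y, group[0][2], group[0][3]); group is always nonempty where called
def pvFlushA (g : List (Int × Int × Int × Int)) : Int × Int × Int × Int :=
  let n : Int := g.length
  let avg_x := PySem.Int.floordiv ((g.map (fun p => p.1)).sum) n
  let avg_y := PySem.Int.floordiv ((g.map (fun p => p.2.1)).sum) n
  (avg_x, avg_y, (g.headD (0, 0, 0, 0)).2.2.1, (g.headD (0, 0, 0, 0)).2.2.2)

-- the 'for pos in positions[1:]' loop over state (merged, current_group)
def pvLoopA (threshold : Int) (merged cur : List (Int × Int × Int × Int)) :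
    List (Int × Int × Int × Int) → List (Int × Int × Int × Int)
  | [] => if cur.isEmpty then merged else merged ++ [pvFlushA cur]
  | pos :: rest =>
      let last := cur.getLastD pos   -- current_group[-1]; cur is nonempty on every reachable call
      if |pos.1 - last.1| ≤ threshold ∧ |pos.2.1 - last.2.1| ≤ threshold then
        pvLoopA threshold merged (cur ++ [pos]) rest
      else
        pvLoopA threshold (if cur.isEmpty then merged else merged ++ [pvFlushA cur]) [pos] rest

def merge_nearby_positions (positions : List (Int × Int × Int × Int)) (threshold : Int) : List (Int × Int × Int × Int) :=
  match positions with
  | [] => []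
  | p0 :: rest => pvLoopA threshold [] [p0] rest

-- ===== PORT B =====
-- pass 1: the 'for pos in positions' loop building labels, state (gid, prev); append becomes cons
def pvLabels (threshold : Int) : Int → Option (Int × Int × Int × Int) →
    List (Int × Int × Int × Int) → List Int
  | _, _, [] => []
  | gid, prev, pos :: rest =>
      let gid' := match prev with
        | none => gid
        | some pr => if threshold < |pos.1 - pr.1| ∨ threshold < |pos.2.1 - pr.2.1| then gid + 1 else gid
      gid' :: pvLabels threshold gid' (some pos) rest

-- pass 2: the 'for g, pos in zip(labels, positions)' loop over the dict agg
-- ('g in agg' and the read agg[g] are the some/none cases of one get?)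
def pvAggLoop : PySem.Dict Int (Int × Int × Int × Int × Int) →
    List (Int × (Int × Int × Int × Int)) → PySem.Dict Int (Int × Int × Int × Int × Int)
  | d, [] => d
  | d, (g, pos) :: rest =>
      match d.get? g with
      | some (sx, sy, c, t2, t3) => pvAggLoop (d.insert g (sx + pos.1, sy + pos.2.1, c + 1, t2, t3)) rest
      | none => pvAggLoop (d.insert g (pos.1, pos.2.1, 1, pos.2.2.1, pos.2.2.2)) rest

def merge_nearby_positions_alt (positions : List (Int × Int × Int × Int)) (threshold : Int) : List (Int × Int × Int × Int) :=
  let labels := pvLabels threshold 0 none positions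
  let agg := pvAggLoop PySem.Dict.empty (labels.zip positions)
  agg.values.map (fun v => (PySem.Int.floordiv v.1 v.2.2.1, PySem.Int.floordiv v.2.1 v.2.2.1,
    v.2.2.2.1, v.2.2.2.2))

-- ===== PRECONDITION & SPEC =====
def Spec_merge_nearby_positions (positions : List (Int × Int × Int × Int)) (threshold : Int) (out : List (Int × Int × Int × Int)) : Prop := out = merge_nearby_positions_alt positions threshold
instance (positions : List (Int × Int × Int × Int)) (threshold : Int) (out : List (Int × Int × Int × Int)) : Decidable (Spec_merge_nearby_positions positions threshold out) := by unfold Spec_merge_nearby_positions; infer_instance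

-- ===== CLAIM (what is proved, stated in full; the proofs are below) =====
def Claim_equal_merge_nearby_positions : Prop := ∀ (positions : List (Int × Int × Int × Int)) (threshold : Int), Dom_merge_nearby_positions positions threshold → Spec_merge_nearby_positions positions threshold (merge_nearby_positions positions threshold)

-- ===== LEMMAS AND PROOFS =====

-- length of the maximal run of elements each near its predecessor, starting after prev
def pvRunLen (threshold : Int) (prev : Int × Int × Int × Int) : List (Int × Int × Int × Int) → Nat
  | [] => 0
  | q :: rest =>
      if |q.1 - prev.1| ≤ threshold ∧ |q.2.1 - prev.2.1| ≤ threshold then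
        pvRunLen threshold q rest + 1
      else 0

theorem pvRunLen_le (threshold : Int) (prev : Int × Int × Int × Int) (l : List (Int × Int × Int × Int)) :
    pvRunLen threshold prev l ≤ l.length := by
  induction l generalizing prev with
  | nil => simp [pvRunLen]
  | cons q rest ih =>
      simp only [pvRunLen]
      split
      · simpa using Nat.succ_le_succ (ih q)
      · simp

-- segmentation of the input into maximal runs of adjacent near positions
def pvSegs (threshold : Int) : List (Int × Int × Int × Int) → List (List (Int × Int × Int × Int))
  | [] => []
  | p :: rest =>
      (p :: rest.take (pvRunLen threshold p rest)) :: pvSegs threshold (rest.drop (pvRunLen threshold p rest))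
termination_by l => l.length
decreasing_by
  simp only [List.length_cons, List.length_drop]
  omega

theorem pvSegs_flatten (threshold : Int) (l : List (Int × Int × Int × Int)) :
    (pvSegs threshold l).flatten = l := by
  induction hn : l.length using Nat.strong_induction_on generalizing l with
  | _ n ih =>
  subst hn
  cases l with
  | nil => simp [pvSegs]
  | cons p rest =>
      rw [pvSegs]
      simp only [List.flatten_cons, List.cons_append]
      rw [ih (rest.drop (pvRunLen threshold p rest)).length
        (by simp only [List.length_drop, List.length_cons]; omega) _ rfl]
      simp [List.take_append_drop]

theorem pvSegs_ne_nil (threshold : Int) (l : List (Int × Int × Int × Int)) :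
    ∀ s ∈ pvSegs threshold l, s ≠ [] := by
  induction hn : l.length using Nat.strong_induction_on generalizing l with
  | _ n ih =>
  subst hn
  cases l with
  | nil => simp [pvSegs]
  | cons p rest =>
      rw [pvSegs]
      intro s hs
      rcases List.mem_cons.mp hs with rfl | hs'
      · simp
      · exact ih (rest.drop (pvRunLen threshold p rest)).length
          (by simp only [List.length_drop, List.length_cons]; omega) _ rfl s hs'

-- getLastD of a list with an appended element
theorem getLastD_concat' (l : List (Int × Int × Int × Int)) (a d : Int × Int × Int × Int) :
    (l ++ [a]).getLastD d = a := by
  cases l <;> simp [List.getLastD]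

-- (A) pvLoopA with nonempty current group g ++ [prev] (prev = its last element)
theorem pvLoopA_eq (threshold : Int) (rest : List (Int × Int × Int × Int))
    (merged g : List (Int × Int × Int × Int)) (prev : Int × Int × Int × Int) :
    pvLoopA threshold merged (g ++ [prev]) rest
      = merged ++ pvFlushA ((g ++ [prev]) ++ rest.take (pvRunLen threshold prev rest))
          :: (pvSegs threshold (rest.drop (pvRunLen threshold prev rest))).map pvFlushA := by
  induction rest generalizing merged g prev with
  | nil =>
      simp [pvLoopA, pvRunLen, pvSegs]
  | cons q rest' ih =>
      simp only [pvLoopA, getLastD_concat']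
      by_cases hc : |q.1 - prev.1| ≤ threshold ∧ |q.2.1 - prev.2.1| ≤ threshold
      · rw [if_pos hc]
        have := ih (merged := merged) (g := g ++ [prev]) (prev := q)
        rw [this]
        simp only [pvRunLen, if_pos hc]
        rw [List.take_succ_cons, List.drop_succ_cons]
        congr 2
        simp
      · rw [if_neg hc]
        have hne : (g ++ [prev]).isEmpty = false := by simp
        rw [hne]
        simp only [Bool.false_eq_true, if_false]
        have := ih (merged := merged ++ [pvFlushA (g ++ [prev])]) (g := []) (prev := q)
        simp only [List.nil_append] at this
        rw [this]
        simp only [pvRunLen, if_neg hc]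
        rw [List.take_zero, List.drop_zero]
        conv_rhs => rw [pvSegs]
        simp

-- ===== B-side characterisation =====

-- the labels of a segment list: segment i (0-based from gid) contributes len copies of its id
def pvSegLabels (gid : Int) : List (List (Int × Int × Int × Int)) → List Int
  | [] => []
  | s :: ss => List.replicate s.length gid ++ pvSegLabels (gid + 1) ss

-- head form of pass 1: first element gets the current gid
def pvLabelsHead (threshold : Int) (gid : Int) : List (Int × Int × Int × Int) → List Int
  | [] => []
  | p :: rest => gid :: pvLabels threshold gid (some p) rest

theorem pvLabels_some_eq (threshold : Int) (rest : List (Int × Int × Int × Int))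
    (gid : Int) (p : Int × Int × Int × Int) :
    pvLabels threshold gid (some p) rest
      = List.replicate (pvRunLen threshold p rest) gid
          ++ pvLabelsHead threshold (gid + 1) (rest.drop (pvRunLen threshold p rest)) := by
  induction rest generalizing gid p with
  | nil => simp [pvLabels, pvRunLen, pvLabelsHead]
  | cons q rest' ih =>
      by_cases hc : |q.1 - p.1| ≤ threshold ∧ |q.2.1 - p.2.1| ≤ threshold
      · have hb : ¬ (threshold < |q.1 - p.1| ∨ threshold < |q.2.1 - p.2.1|) := by
          simp only [not_or, not_lt]; exact ⟨hc.1, hc.2⟩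
        simp only [pvLabels, if_neg hb, pvRunLen, if_pos hc]
        rw [ih gid q, List.drop_succ_cons, List.replicate_succ]
        simp
      · have hb : threshold < |q.1 - p.1| ∨ threshold < |q.2.1 - p.2.1| := by
          by_contra h
          simp only [not_or, not_lt] at h
          exact hc ⟨h.1, h.2⟩
        simp only [pvLabels, if_pos hb, pvRunLen, if_neg hc]
        simp [pvLabelsHead]

theorem pvLabelsHead_eq_segLabels (threshold : Int) (l : List (Int × Int × Int × Int)) (gid : Int) :
    pvLabelsHead threshold gid l = pvSegLabels gid (pvSegs threshold l) := by
  induction hn : l.length using Nat.strong_induction_on generalizing l gid with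
  | _ n ih =>
  subst hn
  cases l with
  | nil => simp [pvLabelsHead, pvSegs, pvSegLabels]
  | cons p rest =>
      rw [pvSegs]
      simp only [pvLabelsHead, pvSegLabels]
      rw [pvLabels_some_eq]
      have hle := pvRunLen_le threshold p rest
      rw [ih (rest.drop (pvRunLen threshold p rest)).length
        (by simp only [List.length_drop, List.length_cons]; omega) _ (gid + 1) rfl]
      simp [List.length_take, Nat.min_eq_left hle, List.replicate_succ]

-- each segment's positions tagged with its group id, flattened
def pvTagged (gid : Int) : List (List (Int × Int × Int × Int)) → List (Int × (Int × Int × Int × Int))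
  | [] => []
  | s :: ss => s.map (fun pos => (gid, pos)) ++ pvTagged (gid + 1) ss

theorem zip_replicate_self (gid : Int) (s : List (Int × Int × Int × Int)) :
    (List.replicate s.length gid).zip s = s.map (fun pos => (gid, pos)) := by
  induction s with
  | nil => simp
  | cons q s' ih => simp [List.replicate_succ, ih]

theorem zip_segLabels (gid : Int) (segs : List (List (Int × Int × Int × Int))) :
    (pvSegLabels gid segs).zip segs.flatten = pvTagged gid segs := by
  induction segs generalizing gid with
  | nil => simp [pvSegLabels, pvTagged]
  | cons s ss ih =>
      simp only [pvSegLabels, pvTagged, List.flatten_cons]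
      rw [List.zip_append (by simp), zip_replicate_self, ih]

-- value aggregated for one segment
def pvAggV (s : List (Int × Int × Int × Int)) : Int × Int × Int × Int × Int :=
  ((s.map (fun p => p.1)).sum, (s.map (fun p => p.2.1)).sum, (s.length : Int),
    (s.headD (0, 0, 0, 0)).2.2.1, (s.headD (0, 0, 0, 0)).2.2.2)

theorem pvAggLoop_run (s : List (Int × Int × Int × Int))
    (d : PySem.Dict Int (Int × Int × Int × Int × Int)) (g sx sy c t2 t3 : Int)
    (tail : List (Int × (Int × Int × Int × Int)))
    (h : d.get? g = some (sx, sy, c, t2, t3)) :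
    pvAggLoop d (s.map (fun pos => (g, pos)) ++ tail)
      = pvAggLoop (if s.isEmpty then d
          else d.insert g (sx + (s.map (fun p => p.1)).sum, sy + (s.map (fun p => p.2.1)).sum,
            c + s.length, t2, t3)) tail := by
  induction s generalizing d sx sy c with
  | nil => simp
  | cons q s' ih =>
      simp only [List.map_cons, List.cons_append, pvAggLoop, h, List.isEmpty_cons,
        Bool.false_eq_true, if_false]
      rw [ih (d.insert g (sx + q.1, sy + q.2.1, c + 1, t2, t3)) _ _ _
        (PySem.Dict.get?_insert_self _ _ _)]
      cases s' with
      | nil => simp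
      | cons r s'' =>
          simp only [List.isEmpty_cons, Bool.false_eq_true, if_false,
            PySem.Dict.insert_insert_self, List.map_cons, List.sum_cons, List.length_cons]
          have ht : (sx + q.1 + ((r.1 + (s''.map (fun p => p.1)).sum)),
                sy + q.2.1 + ((r.2.1 + (s''.map (fun p => p.2.1)).sum)),
                c + 1 + ((s''.length + 1 : Nat) : Int), t2, t3)
              = (sx + (q.1 + (r.1 + (s''.map (fun p => p.1)).sum)),
                sy + (q.2.1 + (r.2.1 + (s''.map (fun p => p.2.1)).sum)),
                c + ((s''.length + 1 + 1 : Nat) : Int), t2, t3) := by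
            simp only [Prod.mk.injEq]
            push_cast
            and_intros <;> first | ring | trivial
          rw [ht]

theorem pvAggLoop_seg (s : List (Int × Int × Int × Int)) (hs : s ≠ [])
    (d : PySem.Dict Int (Int × Int × Int × Int × Int)) (g : Int)
    (tail : List (Int × (Int × Int × Int × Int)))
    (h : d.get? g = none) :
    pvAggLoop d (s.map (fun pos => (g, pos)) ++ tail)
      = pvAggLoop (d.insert g (pvAggV s)) tail := by
  cases s with
  | nil => exact absurd rfl hs
  | cons p s' =>
      simp only [List.map_cons, List.cons_append, pvAggLoop, h]
      rw [pvAggLoop_run s' _ g _ _ _ _ _ _ (PySem.Dict.get?_insert_self _ _ _)]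
      cases s' with
      | nil => simp [pvAggV]
      | cons r s'' =>
          simp only [List.isEmpty_cons, Bool.false_eq_true, if_false,
            PySem.Dict.insert_insert_self, List.map_cons, List.sum_cons, List.length_cons]
          have ht : (p.1 + (r.1 + (s''.map (fun p => p.1)).sum),
                p.2.1 + (r.2.1 + (s''.map (fun p => p.2.1)).sum),
                (1 : Int) + ((s''.length + 1 : Nat) : Int), p.2.2.1, p.2.2.2)
              = pvAggV (p :: r :: s'') := by
            simp only [pvAggV, List.map_cons, List.sum_cons, List.length_cons, List.headD_cons,
              Prod.mk.injEq]
            push_cast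
            and_intros <;> first | ring | trivial
          rw [ht]

theorem pvAggLoop_tagged (segs : List (List (Int × Int × Int × Int)))
    (hne : ∀ s ∈ segs, s ≠ []) :
    ∀ (gid : Int) (d : PySem.Dict Int (Int × Int × Int × Int × Int)),
      (∀ g' : Int, gid ≤ g' → d.get? g' = none) →
      (pvAggLoop d (pvTagged gid segs)).values = d.values ++ segs.map pvAggV := by
  induction segs with
  | nil => intro gid d _; simp [pvTagged, pvAggLoop]
  | cons s ss ih =>
      intro gid d hd
      simp only [pvTagged]
      rw [pvAggLoop_seg s (hne s (by simp)) d gid _ (hd gid le_rfl)]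
      have hnc : d.contains gid = false := by
        have := hd gid le_rfl
        rcases hcc : d.contains gid with _ | _
        · rfl
        · exact absurd this (by simp [PySem.Dict.get?_eq_none_iff_contains, hcc])
      rw [ih (fun s hs => hne s (by simp [hs])) (gid + 1) _
        (fun g' hg' => by
          rw [PySem.Dict.get?_insert_of_ne _ _ (by omega)]
          exact hd g' (by omega))]
      have hv : (d.insert gid (pvAggV s)).values = d.values ++ [pvAggV s] := by
        simp only [PySem.Dict.values, PySem.Dict.items_insert_of_not_contains _ _ hnc]
        simp
      rw [hv]
      simp

-- emit (floor-averaging) of an aggregated value equals pvFlushA on the segment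
theorem emit_aggV (s : List (Int × Int × Int × Int)) :
    (PySem.Int.floordiv (pvAggV s).1 (pvAggV s).2.2.1,
      PySem.Int.floordiv (pvAggV s).2.1 (pvAggV s).2.2.1,
      (pvAggV s).2.2.2.1, (pvAggV s).2.2.2.2) = pvFlushA s := rfl

-- ===== VERDICT (by name: the statement is the Claim_ definition above) =====
theorem merge_nearby_positions_spec : Claim_equal_merge_nearby_positions := by
  intro positions threshold _
  unfold Spec_merge_nearby_positions
  unfold merge_nearby_positions_alt
  simp only []
  have hzip : (pvLabels threshold 0 none positions).zip positions
      = pvTagged 0 (pvSegs threshold positions) := by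
    have h1 : pvLabels threshold 0 none positions = pvLabelsHead threshold 0 positions := by
      cases positions with
      | nil => rfl
      | cons p rest => simp [pvLabels, pvLabelsHead]
    rw [h1, pvLabelsHead_eq_segLabels]
    have h2 := zip_segLabels 0 (pvSegs threshold positions)
    rw [pvSegs_flatten] at h2
    exact h2
  rw [hzip]
  rw [pvAggLoop_tagged (pvSegs threshold positions) (pvSegs_ne_nil threshold positions) 0
    PySem.Dict.empty (fun g' _ => PySem.Dict.get?_empty g')]
  simp only [PySem.Dict.values, PySem.Dict.empty]
  simp only [List.map_nil, List.nil_append, List.map_map]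
  have hmap : ∀ segs : List (List (Int × Int × Int × Int)),
      segs.map ((fun v : Int × Int × Int × Int × Int =>
          (PySem.Int.floordiv v.1 v.2.2.1, PySem.Int.floordiv v.2.1 v.2.2.1,
            v.2.2.2.1, v.2.2.2.2)) ∘ pvAggV) = segs.map pvFlushA := by
    intro segs
    exact List.map_congr_left (fun s _ => emit_aggV s)
  rw [hmap]
  -- A side
  unfold merge_nearby_positions
  cases positions with
  | nil => simp [pvSegs]
  | cons p rest =>
      show pvLoopA threshold [] [p] rest = List.map pvFlushA (pvSegs threshold (p :: rest))
      have hA := pvLoopA_eq threshold rest [] [] p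
      simp only [List.nil_append] at hA
      rw [hA]
      conv_rhs => rw [pvSegs]
      simp
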